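-- pv_equiv track=rewrite | github.com/qualya/password-manager | main.py | hexToWords
-- ===== SOURCE A (Python) =====
-- def hexToWords(hexKey, wordsList):
--     private_key_num = int(hexKey, base=16) #converts the private key to base 10
--
--     digits = [] #converts the base 10 private key into a list of base 2048
--     while private_key_num:
--         digits.append(int(private_key_num % 2048))
--         private_key_num //= 2048
--     digits = digits[::-1]
--
--     mnemonic = list() #converts the digits into a mnemonic
--     for number in digits:
--         mnemonic.append(wordsList[number])
--
--     return mnemonic
-- ===== SOURCE B (Python) =====
-- def hexToWords(hexKey, wordsList):
--     num = int(hexKey, base=16)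
--     if num == 0:
--         return []
--     bits = bin(num)[2:]
--     bits = '0' * (-len(bits) % 11) + bits
--     return [wordsList[int(bits[i:i + 11], 2)] for i in range(0, len(bits), 11)]
-- ===== Notes on version B (the rewrite author's own statement) =====
-- stated objective: alternative
-- what changed: B parses the hex key once, builds the full binary string of the number, left-pads it to a multiple of 11 bits and maps each 11-bit chunk (MSB first) to a word, instead of A's repeated divide-by-2048 loop followed by a list reversal.
import Mathlib
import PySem

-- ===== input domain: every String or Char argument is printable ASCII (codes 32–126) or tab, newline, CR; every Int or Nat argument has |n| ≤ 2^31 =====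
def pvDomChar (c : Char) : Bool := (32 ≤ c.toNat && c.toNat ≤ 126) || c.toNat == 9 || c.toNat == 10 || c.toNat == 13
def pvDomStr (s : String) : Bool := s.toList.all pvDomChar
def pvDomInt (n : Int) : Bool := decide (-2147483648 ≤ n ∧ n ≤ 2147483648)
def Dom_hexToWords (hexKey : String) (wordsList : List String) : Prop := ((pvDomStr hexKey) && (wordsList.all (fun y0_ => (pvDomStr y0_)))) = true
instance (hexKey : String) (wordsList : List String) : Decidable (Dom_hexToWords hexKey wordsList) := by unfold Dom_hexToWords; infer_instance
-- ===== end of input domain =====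

-- B builds the whole binary string of the parsed number once, left-pads it to a multiple
-- of 11 bits and maps each 11-bit chunk (MSB first) to a word, instead of A's
-- divide-by-2048 loop followed by a list reversal.

-- ===== PORT A =====
-- the 'while private_key_num:' loop; Python A terminates only when the parsed number is
-- nonnegative (Pre_ guarantees 0 ≤ m), so the loop state is carried as a Nat
def pyDigitsA (n : Nat) (acc : List Int) : List Int :=
  if n = 0 then acc else pyDigitsA (n / 2048) (acc ++ [((n % 2048 : Nat) : Int)])
termination_by n
decreasing_by exact Nat.div_lt_self (Nat.pos_of_ne_zero (by assumption)) (by norm_num)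

def hexToWords (hexKey : String) (wordsList : List String) : List String :=
  match PySem.Int.ofStrBase? hexKey 16 with
  | none => []   -- int(hexKey, 16) raises ValueError: excluded by Pre_
  | some m =>
    let digits := (pyDigitsA m.toNat []).reverse   -- digits[::-1]
    -- wordsList[number]: IndexError is excluded by Pre_, so .getD "" is never visible
    digits.foldl (fun mn number => mn ++ [(PySem.List.pyGet? wordsList number).getD ""]) []

-- ===== PORT B =====
-- bin(num)[2:] for num > 0, MSB first (hand port of bin(): PySem has no binary formatter;
-- exact for the nonnegative numbers B reaches it with)
def toBin (n : Nat) : List Char :=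
  if n = 0 then [] else toBin (n / 2) ++ [if n % 2 = 1 then '1' else '0']
termination_by n
decreasing_by exact Nat.div_lt_self (Nat.pos_of_ne_zero (by assumption)) (by norm_num)

-- int(chunk, 2) on a chunk of '0'/'1' characters (hand port, exact on such chunks)
def chunkVal (cs : List Char) : Nat := cs.foldl (fun a c => 2 * a + (if c = '1' then 1 else 0)) 0

-- bits[i:i+11] for i in range(0, len(bits), 11) — consecutive 11-char chunks from the front
def chunks11 (cs : List Char) : List (List Char) :=
  if cs = [] then [] else cs.take 11 :: chunks11 (cs.drop 11)
termination_by cs.length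
decreasing_by
  rename_i h
  have : cs.length ≠ 0 := fun hl => h (List.eq_nil_of_length_eq_zero hl)
  simp [List.length_drop]; omega

def hexToWords_alt (hexKey : String) (wordsList : List String) : List String :=
  match PySem.Int.ofStrBase? hexKey 16 with
  | none => []   -- same ValueError inputs, excluded by Pre_
  | some m =>
    if m = 0 then []
    else
      let bits := toBin m.toNat
      let padded := List.replicate ((11 - bits.length % 11) % 11) '0' ++ bits
      (chunks11 padded).map
        (fun ch => (PySem.List.pyGet? wordsList ((chunkVal ch : Nat) : Int)).getD "")

-- ===== PRECONDITION & SPEC =====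
-- Pre_ = exactly where Python A returns: the hex parse succeeds (else ValueError), the
-- parsed value is nonnegative (A's while-loop diverges on a negative number), and every
-- base-2048 digit of the value indexes inside wordsList (else IndexError); positions k
-- up to hexKey.length cover all digits since the value is < 16^hexKey.length ≤ 2048^hexKey.length.
def Pre_hexToWords (hexKey : String) (wordsList : List String) : Prop :=
  (PySem.Int.ofStrBase? hexKey 16).isSome = true ∧
  ∀ m ∈ (PySem.Int.ofStrBase? hexKey 16).toList,
    0 ≤ m ∧ ∀ k ∈ List.range hexKey.length,
      2048 ^ k ≤ m.toNat → m.toNat / 2048 ^ k % 2048 < wordsList.length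
instance (hexKey : String) (wordsList : List String) : Decidable (Pre_hexToWords hexKey wordsList) := by
  unfold Pre_hexToWords; infer_instance

def pvWitness_hexToWords : String × List String :=
  ("1003", ["a", "b", "c", "d", "e"])

def Spec_hexToWords (hexKey : String) (wordsList : List String) (out : List String) : Prop := out = hexToWords_alt hexKey wordsList
instance (hexKey : String) (wordsList : List String) (out : List String) : Decidable (Spec_hexToWords hexKey wordsList out) := by unfold Spec_hexToWords; infer_instance

-- ===== CLAIM (what is proved, stated in full; the proofs are below) =====
def Claim_equal_hexToWords : Prop := ∀ (hexKey : String) (wordsList : List String), Dom_hexToWords hexKey wordsList → Pre_hexToWords hexKey wordsList → Spec_hexToWords hexKey wordsList (hexToWords hexKey wordsList)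

-- ===== LEMMAS AND PROOFS =====

-- equation lemmas
theorem toBin_zero : toBin 0 = [] := by rw [toBin]; rfl
theorem toBin_pos (n : Nat) (h : n ≠ 0) :
    toBin n = toBin (n / 2) ++ [if n % 2 = 1 then '1' else '0'] := by
  rw [toBin]; simp [h]
theorem chunks11_nil : chunks11 [] = [] := by rw [chunks11]; simp
theorem chunks11_cons (cs : List Char) (h : cs ≠ []) :
    chunks11 cs = cs.take 11 :: chunks11 (cs.drop 11) := by
  rw [chunks11]; simp [h]

-- canonical base-2048 digit list of n, most significant first
def canon (n : Nat) : List Int :=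
  if n = 0 then [] else canon (n / 2048) ++ [((n % 2048 : Nat) : Int)]
termination_by n
decreasing_by exact Nat.div_lt_self (Nat.pos_of_ne_zero (by assumption)) (by norm_num)

theorem canon_zero : canon 0 = [] := by rw [canon]; rfl
theorem canon_pos (n : Nat) (h : n ≠ 0) :
    canon n = canon (n / 2048) ++ [((n % 2048 : Nat) : Int)] := by
  rw [canon]; simp [h]

theorem pyDigitsA_eq (n : Nat) : ∀ acc, pyDigitsA n acc = acc ++ (canon n).reverse := by
  induction n using Nat.strong_induction_on with
  | _ n ih =>
    intro acc
    rw [pyDigitsA, canon]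
    by_cases h : n = 0
    · simp [h]
    · simp only [if_neg h]
      rw [ih (n / 2048) (Nat.div_lt_self (Nat.pos_of_ne_zero h) (by norm_num))]
      simp

-- the k lowest bits of n, MSB first, fixed width k
def toBinFix (k n : Nat) : List Char :=
  match k with
  | 0 => []
  | k + 1 => toBinFix k (n / 2) ++ [if n % 2 = 1 then '1' else '0']

theorem toBinFix_length (k n : Nat) : (toBinFix k n).length = k := by
  induction k generalizing n with
  | zero => rfl
  | succ k ih => simp [toBinFix, ih]

theorem toBin_split (k : Nat) : ∀ n, 2 ^ k ≤ n → toBin n = toBin (n / 2 ^ k) ++ toBinFix k n := by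
  induction k with
  | zero => intro n _; simp [toBinFix]
  | succ k ih =>
    intro n hn
    have hp : (2:Nat) ^ (k + 1) = 2 * 2 ^ k := by ring
    have hpos : (0:Nat) < 2 ^ k := by positivity
    have h0 : n ≠ 0 := by omega
    have h' : 2 ^ k ≤ n / 2 := by omega
    have hdiv : n / 2 ^ (k + 1) = n / 2 / 2 ^ k := by
      rw [Nat.div_div_eq_div_mul, hp, Nat.mul_comm]
    rw [toBin_pos n h0, ih (n / 2) h', hdiv, toBinFix, List.append_assoc]

theorem toBin_len_le (k : Nat) : ∀ n, n < 2 ^ k → (toBin n).length ≤ k := by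
  induction k with
  | zero => intro n h; interval_cases n; simp [toBin_zero]
  | succ k ih =>
    intro n h
    by_cases h0 : n = 0
    · simp [h0, toBin_zero]
    · rw [toBin_pos n h0]
      have hp : (2:Nat) ^ (k + 1) = 2 * 2 ^ k := by ring
      have := ih (n / 2) (by omega)
      simp [List.length_append]
      omega

theorem toBin_len_pos (n : Nat) (h : n ≠ 0) : 1 ≤ (toBin n).length := by
  rw [toBin_pos n h]; simp

theorem toBin_fix_of_lt (k : Nat) : ∀ n, n < 2 ^ k →
    toBinFix k n = List.replicate (k - (toBin n).length) '0' ++ toBin n := by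
  induction k with
  | zero => intro n h; interval_cases n; simp [toBin_zero, toBinFix]
  | succ k ih =>
    intro n h
    have hp : (2:Nat) ^ (k + 1) = 2 * 2 ^ k := by ring
    rw [toBinFix, ih (n / 2) (by omega)]
    by_cases h0 : n = 0
    · subst h0
      simp [toBin_zero, ← List.replicate_succ' (n := k)]
    · rw [toBin_pos n h0]
      have hlen := toBin_len_le k (n / 2) (by omega)
      have hL : (toBin (n / 2) ++ [if n % 2 = 1 then '1' else '0']).length
          = (toBin (n / 2)).length + 1 := by simp
      rw [hL, Nat.succ_sub_succ, List.append_assoc]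

theorem chunkVal_go (k : Nat) : ∀ n a,
    (toBinFix k n).foldl (fun a c => 2 * a + (if c = '1' then 1 else 0)) a
      = a * 2 ^ k + n % 2 ^ k := by
  induction k with
  | zero => intro n a; simp [toBinFix, Nat.mod_one]
  | succ k ih =>
    intro n a
    rw [toBinFix, List.foldl_append, ih (n / 2) a]
    have hm : n % 2 ^ (k + 1) = n % 2 + 2 * (n / 2 % 2 ^ k) := by
      have hp : (2:Nat) ^ (k + 1) = 2 * 2 ^ k := by ring
      rw [hp]; exact Nat.mod_mul
    have hb : (if (if n % 2 = 1 then '1' else '0') = '1' then 1 else 0) = n % 2 := by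
      by_cases h2 : n % 2 = 1 <;> simp [h2] <;> omega
    simp only [List.foldl_cons, List.foldl_nil, hb]
    have hp : (2:Nat) ^ (k + 1) = 2 * 2 ^ k := by ring
    rw [hm, hp]; ring

theorem chunkVal_fix (k n : Nat) : chunkVal (toBinFix k n) = n % 2 ^ k := by
  have := chunkVal_go k n 0
  simpa [chunkVal] using this

theorem chunks11_full (cs : List Char) (h : cs.length = 11) : chunks11 cs = [cs] := by
  have hne : cs ≠ [] := by intro he; rw [he] at h; simp at h
  rw [chunks11_cons cs hne, List.take_of_length_le (by omega), List.drop_eq_nil_of_le (by omega),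
      chunks11_nil]

theorem chunks11_append (m : Nat) : ∀ (xs ys : List Char), xs.length = 11 * m →
    chunks11 (xs ++ ys) = chunks11 xs ++ chunks11 ys := by
  induction m with
  | zero =>
    intro xs ys h
    have : xs = [] := List.eq_nil_of_length_eq_zero (by omega)
    simp [this, chunks11_nil]
  | succ m ih =>
    intro xs ys h
    have h11 : 11 ≤ xs.length := by omega
    have hne : xs ≠ [] := by intro he; rw [he] at h11; simp at h11
    have hne' : xs ++ ys ≠ [] := by
      intro he
      have h0 : (xs ++ ys).length = 0 := by rw [he]; rfl
      rw [List.length_append] at h0; omega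
    rw [chunks11_cons _ hne', chunks11_cons xs hne,
        List.take_append_of_le_length h11, List.drop_append_of_le_length h11]
    rw [ih (xs.drop 11) ys (by simp; omega)]
    simp

theorem main_B (n : Nat) (hn : 0 < n) :
    (chunks11 (List.replicate ((11 - (toBin n).length % 11) % 11) '0' ++ toBin n)).map
      (fun ch => ((chunkVal ch : Nat) : Int)) = canon n := by
  induction n using Nat.strong_induction_on with
  | _ n ih =>
    have h2048 : (2:Nat) ^ 11 = 2048 := by norm_num
    by_cases hlt : n < 2048
    · -- single chunk
      have hfix := toBin_fix_of_lt 11 n (by omega)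
      have hL1 : 1 ≤ (toBin n).length := toBin_len_pos n (by omega)
      have hL11 : (toBin n).length ≤ 11 := toBin_len_le 11 n (by omega)
      have hpad : (11 - (toBin n).length % 11) % 11 = 11 - (toBin n).length := by omega
      rw [hpad, ← hfix, chunks11_full _ (toBinFix_length 11 n),
          canon_pos n (by omega), Nat.div_eq_of_lt hlt, canon_zero]
      simp [chunkVal_fix, h2048, Nat.mod_eq_of_lt hlt]
    · -- peel the lowest 11 bits
      have hge : 2 ^ 11 ≤ n := by omega
      have hsplit := toBin_split 11 n hge
      have hdiv : n / 2 ^ 11 = n / 2048 := by norm_num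
      rw [hdiv] at hsplit
      have hq : 0 < n / 2048 := Nat.div_pos (by omega) (by norm_num)
      rw [hsplit]
      have hlen2 : (toBin (n / 2048) ++ toBinFix 11 n).length = (toBin (n / 2048)).length + 11 := by
        simp [toBinFix_length]
      rw [hlen2]
      have hpad2 : (11 - ((toBin (n / 2048)).length + 11) % 11) % 11
          = (11 - (toBin (n / 2048)).length % 11) % 11 := by omega
      rw [hpad2, ← List.append_assoc]
      set p := (11 - (toBin (n / 2048)).length % 11) % 11 with hp
      have hmul : (List.replicate p '0' ++ toBin (n / 2048)).length % 11 = 0 := by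
        simp [List.length_replicate]; omega
      obtain ⟨m, hm⟩ := (Nat.dvd_iff_mod_eq_zero (m := 11)).mpr hmul
      rw [chunks11_append m _ _ hm, List.map_append]
      rw [ih (n / 2048) (Nat.div_lt_self (by omega) (by norm_num)) hq]
      rw [chunks11_full _ (toBinFix_length 11 n), List.map_cons, List.map_nil,
          chunkVal_fix, h2048, canon_pos n (by omega)]

theorem foldl_map_words (f : Int → String) (l : List Int) : ∀ acc,
    l.foldl (fun mn x => mn ++ [f x]) acc = acc ++ l.map f := by
  induction l with
  | nil => simp
  | cons x xs ih => intro acc; simp [List.foldl, ih]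

-- ===== VERDICT (by name: the statement is the Claim_ definition above) =====
theorem hexToWords_spec : Claim_equal_hexToWords := by
  intro hexKey wordsList _ hpre
  unfold Spec_hexToWords hexToWords hexToWords_alt
  obtain ⟨-, hall⟩ := hpre
  cases hp : PySem.Int.ofStrBase? hexKey 16 with
  | none => simp
  | some m =>
    have hm0 : 0 ≤ m := (hall m (by simp [hp])).1
    simp only
    rw [pyDigitsA_eq, List.nil_append, List.reverse_reverse,
        foldl_map_words (fun number => (PySem.List.pyGet? wordsList number).getD "")]
    by_cases hz : m = 0
    · subst hz; simp [canon_zero]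
    · have hnz : 0 < m.toNat := by omega
      rw [if_neg hz, ← main_B m.toNat hnz, List.map_map]
      simp [Function.comp]
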